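-- pv_equiv track=rewrite | github.com/DolphinLong/dersdagitimprogrami | algorithms/curriculum_based_scheduler.py | _decompose_into_blocks
-- ===== SOURCE A (Python) =====
-- from typing import List, Dict, Any, Tuple
--
-- def _decompose_into_blocks(weekly_hours: int) -> List[int]:
--     """
--     Decompose weekly hours into blocks according to MEB rules
--
--     Examples:
--     - 1 hour: [1]
--     - 2 hours: [2]
--     - 3 hours: [2, 1]
--     - 4 hours: [2, 2]
--     - 5 hours: [2, 2, 1]
--     - 6 hours: [2, 2, 2]
--     """
--     if weekly_hours <= 0:
--         return []
--     elif weekly_hours == 1: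
--         return [1]
--     elif weekly_hours == 2:
--         return [2]
--     elif weekly_hours == 3:
--         return [2, 1]
--     elif weekly_hours == 4:
--         return [2, 2]
--     elif weekly_hours == 5:
--         return [2, 2, 1]
--     elif weekly_hours == 6:
--         return [2, 2, 2]
--     else:
--         # For more than 6 hours, use 2-hour blocks + remainder
--         blocks = []
--         remaining = weekly_hours
--         while remaining >= 2:
--             blocks.append(2)
--             remaining -= 2
--         if remaining == 1:
--             blocks.append(1)
--         return blocks
-- ===== SOURCE B (Python) =====
-- from typing import List
--
-- def _decompose_into_blocks(weekly_hours: int) -> List[int]: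
--     if weekly_hours <= 0:
--         return []
--     return [2] * (weekly_hours // 2) + [1] * (weekly_hours % 2)
-- ===== Notes on version B (the rewrite author's own statement) =====
-- stated objective: simpler
-- what changed: Replaced the if/elif branch ladder and the subtracting while loop with a single closed-form construction [2]*(h//2) + [1]*(h%2).
import Mathlib
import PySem

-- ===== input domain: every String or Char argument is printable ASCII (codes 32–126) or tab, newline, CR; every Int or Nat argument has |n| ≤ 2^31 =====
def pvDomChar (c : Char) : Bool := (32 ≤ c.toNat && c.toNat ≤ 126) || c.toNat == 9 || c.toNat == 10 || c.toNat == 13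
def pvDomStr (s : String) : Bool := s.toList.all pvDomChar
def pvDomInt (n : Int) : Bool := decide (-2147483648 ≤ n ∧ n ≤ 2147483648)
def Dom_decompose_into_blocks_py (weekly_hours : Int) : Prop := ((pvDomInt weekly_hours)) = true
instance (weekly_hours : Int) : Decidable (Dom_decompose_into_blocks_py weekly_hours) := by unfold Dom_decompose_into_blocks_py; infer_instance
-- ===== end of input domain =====

-- ===== PORT A =====
-- while remaining >= 2: blocks.append(2); remaining -= 2
def decomposeLoop (remaining : Int) (blocks : List Int) : List Int :=
  if remaining ≥ 2 then
    decomposeLoop (remaining - 2) (blocks ++ [2])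
  else if remaining = 1 then blocks ++ [1] else blocks
termination_by remaining.toNat
decreasing_by omega

def decompose_into_blocks_py (weekly_hours : Int) : List Int :=
  if weekly_hours ≤ 0 then []
  else if weekly_hours = 1 then [1]
  else if weekly_hours = 2 then [2]
  else if weekly_hours = 3 then [2, 1]
  else if weekly_hours = 4 then [2, 2]
  else if weekly_hours = 5 then [2, 2, 1]
  else if weekly_hours = 6 then [2, 2, 2]
  else decomposeLoop weekly_hours []

-- ===== PORT B =====
def decompose_into_blocks_py_alt (weekly_hours : Int) : List Int :=
  if weekly_hours ≤ 0 then []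
  else List.replicate (PySem.Int.floordiv weekly_hours 2).toNat 2
       ++ List.replicate (PySem.Int.mod weekly_hours 2).toNat 1

-- ===== PRECONDITION & SPEC =====
def Spec_decompose_into_blocks_py (weekly_hours : Int) (out : List Int) : Prop := out = decompose_into_blocks_py_alt weekly_hours
instance (weekly_hours : Int) (out : List Int) : Decidable (Spec_decompose_into_blocks_py weekly_hours out) := by unfold Spec_decompose_into_blocks_py; infer_instance

-- ===== CLAIM (what is proved, stated in full; the proofs are below) =====
def Claim_equal_decompose_into_blocks_py : Prop := ∀ (weekly_hours : Int), Dom_decompose_into_blocks_py weekly_hours → Spec_decompose_into_blocks_py weekly_hours (decompose_into_blocks_py weekly_hours)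

-- ===== LEMMAS AND PROOFS =====

theorem decomposeLoop_eq (k : Nat) : ∀ (n : Int) (blocks : List Int), 0 ≤ n → n.toNat ≤ k →
    decomposeLoop n blocks =
      blocks ++ List.replicate (PySem.Int.floordiv n 2).toNat 2
             ++ List.replicate (PySem.Int.mod n 2).toNat 1 := by
  induction k with
  | zero =>
    intro n blocks hn hk
    have hn0 : n = 0 := by omega
    subst hn0
    simp [decomposeLoop, PySem.Int.floordiv, PySem.Int.mod]
  | succ k ih =>
    intro n blocks hn hk
    rw [decomposeLoop]
    have hfd : PySem.Int.floordiv n 2 = n / 2 :=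
      PySem.Int.floordiv_eq_ediv_of_pos (by omega)
    have hmd : PySem.Int.mod n 2 = n % 2 :=
      PySem.Int.mod_eq_emod_of_pos (by omega)
    by_cases h2 : n ≥ 2
    · have hfd' : PySem.Int.floordiv (n - 2) 2 = (n - 2) / 2 :=
        PySem.Int.floordiv_eq_ediv_of_pos (by omega)
      have hmd' : PySem.Int.mod (n - 2) 2 = (n - 2) % 2 :=
        PySem.Int.mod_eq_emod_of_pos (by omega)
      rw [if_pos h2, ih (n - 2) (blocks ++ [2]) (by omega) (by omega)]
      have hq : (PySem.Int.floordiv n 2).toNat = (PySem.Int.floordiv (n - 2) 2).toNat + 1 := by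
        rw [hfd, hfd']; omega
      have hr : (PySem.Int.mod n 2).toNat = (PySem.Int.mod (n - 2) 2).toNat := by
        rw [hmd, hmd']; omega
      rw [hq, hr, List.replicate_succ]
      simp
    · rw [if_neg h2]
      by_cases h1 : n = 1
      · subst h1
        simp [PySem.Int.floordiv, PySem.Int.mod]
      · have hn0 : n = 0 := by omega
        subst hn0
        simp [PySem.Int.floordiv, PySem.Int.mod]

-- ===== VERDICT (by name: the statement is the Claim_ definition above) =====
theorem decompose_into_blocks_py_spec : Claim_equal_decompose_into_blocks_py := by
  intro n _
  unfold Spec_decompose_into_blocks_py decompose_into_blocks_py decompose_into_blocks_py_alt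
  split_ifs with h0 h1 h2 h3 h4 h5 h6
  · rfl
  all_goals first
    | (subst_vars; decide)
    | (rw [decomposeLoop_eq n.toNat n [] (by omega) (by omega)]; simp)
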